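-- pv_equiv track=rewrite | github.com/compsmart/compositional-memory-machine | experiments/exp_d2854_generation_boundary.py | _training_sequences
-- ===== SOURCE A (Python) =====
-- from itertools import product
--
-- def _sequence_family(family: int, branch_bits: tuple[int, int, int, int]) -> list[str]:
--     b0, b1, b2, b3 = branch_bits
--     return [
--         f"fam{family}_start",
--         f"fam{family}_prefix",
--         f"choice0_{b0}",
--         f"fam{family}_pivot0",
--         f"choice1_{b1}",
--         f"fam{family}_pivot1",
--         f"choice2_{b2}",
--         f"fam{family}_pivot2",
--         f"choice3_{b3}",
--         f"fam{family}_end",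
--     ]
--
-- def _training_sequences(n_sequences: int) -> list[list[str]]:
--     rows: list[list[str]] = []
--     family = 0
--     while len(rows) < n_sequences:
--         for bits in product((0, 1), repeat=4):
--             rows.append(_sequence_family(family, bits))
--             if len(rows) == n_sequences:
--                 break
--         family += 1
--     return rows
-- ===== SOURCE B (Python) =====
-- def _sequence_family(family: int, branch_bits: tuple[int, int, int, int]) -> list[str]:
--     b0, b1, b2, b3 = branch_bits
--     return [
--         f"fam{family}_start",
--         f"fam{family}_prefix",
--         f"choice0_{b0}",
--         f"fam{family}_pivot0",
--         f"choice1_{b1}",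
--         f"fam{family}_pivot1",
--         f"choice2_{b2}",
--         f"fam{family}_pivot2",
--         f"choice3_{b3}",
--         f"fam{family}_end",
--     ]
--
-- def _training_sequences(n_sequences: int) -> list[list[str]]:
--     # Row i belongs to family i >> 4; its branch bits are the low 4 bits of i (big-endian).
--     return [
--         _sequence_family(i >> 4, ((i >> 3) & 1, (i >> 2) & 1, (i >> 1) & 1, i & 1))
--         for i in range(n_sequences)
--     ]
-- ===== Notes on version B (the rewrite author's own statement) =====
-- stated objective: simpler
-- what changed: Replaces A's while-loop over families with an inner product((0,1),repeat=4) enumeration and mid-loop break by a single comprehension over range(n) that reconstructs each row's family (i >> 4) and branch bits ((i >> k) & 1) from the row index.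
import Mathlib
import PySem

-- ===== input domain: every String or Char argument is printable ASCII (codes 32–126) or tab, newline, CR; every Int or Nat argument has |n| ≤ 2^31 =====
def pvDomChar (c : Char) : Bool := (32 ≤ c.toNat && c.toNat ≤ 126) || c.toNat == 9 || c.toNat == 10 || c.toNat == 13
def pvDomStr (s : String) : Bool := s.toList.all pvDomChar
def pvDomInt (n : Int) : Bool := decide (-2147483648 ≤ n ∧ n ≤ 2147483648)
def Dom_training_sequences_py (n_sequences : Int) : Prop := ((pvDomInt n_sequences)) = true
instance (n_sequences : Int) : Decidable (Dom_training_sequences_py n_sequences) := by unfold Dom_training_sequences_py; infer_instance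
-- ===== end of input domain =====

-- B replaces A's while-loop over product((0,1),repeat=4) with a single comprehension
-- reconstructing family and branch bits from the row index (simpler decomposition).

-- ===== PORT A =====
-- shared module helper _sequence_family (used verbatim by both Pythons)
def seqFamily (family : Int) (b : Int × Int × Int × Int) : List String :=
  [ "fam" ++ PySem.Int.toStr family ++ "_start",
    "fam" ++ PySem.Int.toStr family ++ "_prefix",
    "choice0_" ++ PySem.Int.toStr b.1,
    "fam" ++ PySem.Int.toStr family ++ "_pivot0",
    "choice1_" ++ PySem.Int.toStr b.2.1,
    "fam" ++ PySem.Int.toStr family ++ "_pivot1",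
    "choice2_" ++ PySem.Int.toStr b.2.2.1,
    "fam" ++ PySem.Int.toStr family ++ "_pivot2",
    "choice3_" ++ PySem.Int.toStr b.2.2.2,
    "fam" ++ PySem.Int.toStr family ++ "_end" ]

-- the fixed iteration order of itertools.product((0, 1), repeat=4)
def bitsProduct : List (Int × Int × Int × Int) :=
  [(0,0,0,0),(0,0,0,1),(0,0,1,0),(0,0,1,1),(0,1,0,0),(0,1,0,1),(0,1,1,0),(0,1,1,1),
   (1,0,0,0),(1,0,0,1),(1,0,1,0),(1,0,1,1),(1,1,0,0),(1,1,0,1),(1,1,1,0),(1,1,1,1)]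

-- the inner 'for bits in product(...)' loop with its break at len(rows) == n
def innerForA (n : Int) (family : Int) (rows : List (List String)) :
    List (Int × Int × Int × Int) → List (List String)
  | [] => rows
  | b :: bs =>
    let rows' := rows ++ [seqFamily family b]
    if (rows'.length : Int) = n then rows' else innerForA n family rows' bs

-- the outer 'while len(rows) < n_sequences' loop (fuel n.toNat suffices: each pass adds ≥ 1 row)
def whileA (n : Int) : Nat → Int → List (List String) → List (List String)
  | 0, _, rows => rows
  | fuel + 1, family, rows =>
    if (rows.length : Int) < n then whileA n fuel (family + 1) (innerForA n family rows bitsProduct)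
    else rows

def training_sequences_py (n_sequences : Int) : List (List String) :=
  whileA n_sequences n_sequences.toNat 0 []

-- ===== PORT B =====
-- Source B: one list comprehension over range(n_sequences); for i ≥ 0, i >> 4 = i // 16 and
-- (i >> k) & 1 = (i // 2^k) % 2, ported with PySem.Int.floordiv / mod (exact here).
def training_sequences_py_alt (n_sequences : Int) : List (List String) :=
  (PySem.List.pyRange 0 n_sequences 1).map (fun i =>
    seqFamily (PySem.Int.floordiv i 16)
      (PySem.Int.mod (PySem.Int.floordiv i 8) 2,
       PySem.Int.mod (PySem.Int.floordiv i 4) 2,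
       PySem.Int.mod (PySem.Int.floordiv i 2) 2,
       PySem.Int.mod i 2))

-- ===== PRECONDITION & SPEC =====
def Spec_training_sequences_py (n_sequences : Int) (out : List (List String)) : Prop := out = training_sequences_py_alt n_sequences
instance (n_sequences : Int) (out : List (List String)) : Decidable (Spec_training_sequences_py n_sequences out) := by unfold Spec_training_sequences_py; infer_instance

-- ===== CLAIM (what is proved, stated in full; the proofs are below) =====
def Claim_equal_training_sequences_py : Prop := ∀ (n_sequences : Int), Dom_training_sequences_py n_sequences → Spec_training_sequences_py n_sequences (training_sequences_py n_sequences)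

-- ===== LEMMAS AND PROOFS =====

-- canonical row at (Nat) index k
def rowN (k : Nat) : List String :=
  seqFamily (↑(k / 16)) (↑(k / 8 % 2), ↑(k / 4 % 2), ↑(k / 2 % 2), ↑(k % 2))

lemma alt_eq_map (n : Int) :
    training_sequences_py_alt n = (List.range n.toNat).map rowN := by
  unfold training_sequences_py_alt
  rw [PySem.List.pyRange_one]
  have hn : (n - 0).toNat = n.toNat := by omega
  rw [hn, List.map_map]
  apply List.map_congr_left
  intro k hk
  simp only [Function.comp, zero_add, rowN]
  have h16 : PySem.Int.floordiv (↑k) 16 = ((k / 16 : Nat) : Int) := PySem.Int.floordiv_natCast k 16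
  have h8 : PySem.Int.floordiv (↑k) 8 = ((k / 8 : Nat) : Int) := PySem.Int.floordiv_natCast k 8
  have h4 : PySem.Int.floordiv (↑k) 4 = ((k / 4 : Nat) : Int) := PySem.Int.floordiv_natCast k 4
  have h2 : PySem.Int.floordiv (↑k) 2 = ((k / 2 : Nat) : Int) := PySem.Int.floordiv_natCast k 2
  have m8 : PySem.Int.mod (↑(k / 8)) 2 = ((k / 8 % 2 : Nat) : Int) := by
    exact_mod_cast PySem.Int.mod_natCast (k / 8) 2
  have m4 : PySem.Int.mod (↑(k / 4)) 2 = ((k / 4 % 2 : Nat) : Int) := by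
    exact_mod_cast PySem.Int.mod_natCast (k / 4) 2
  have m2 : PySem.Int.mod (↑(k / 2)) 2 = ((k / 2 % 2 : Nat) : Int) := by
    exact_mod_cast PySem.Int.mod_natCast (k / 2) 2
  have m1 : PySem.Int.mod (↑k) 2 = ((k % 2 : Nat) : Int) := by
    exact_mod_cast PySem.Int.mod_natCast k 2
  rw [h16, h8, h4, h2, m8, m4, m2, m1]

-- the arithmetic bit-decode of index 16*f + r (r < 16) is family f with the r-th product tuple
lemma rowN_block (f r : Nat) (hr : r < 16) :
    rowN (16 * f + r) = seqFamily (↑f) (bitsProduct[r]'(by simp [bitsProduct]; omega)) := by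
  have e16 : (16 * f + r) / 16 = f := by omega
  have e8 : (16 * f + r) / 8 % 2 = r / 8 % 2 := by omega
  have e4 : (16 * f + r) / 4 % 2 = r / 4 % 2 := by omega
  have e2 : (16 * f + r) / 2 % 2 = r / 2 % 2 := by omega
  have e1 : (16 * f + r) % 2 = r % 2 := by omega
  unfold rowN
  rw [e16, e8, e4, e2, e1]
  interval_cases r <;> rfl

-- the inner loop appends the first (n - len) tuples (or all 16) of the product, for one family
lemma innerForA_eq (n : Int) (family : Int) :
    ∀ (bs : List (Int × Int × Int × Int)) (rows : List (List String)),
      (rows.length : Int) < n →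
      innerForA n family rows bs =
        rows ++ (bs.take (n - rows.length).toNat).map (seqFamily family) := by
  intro bs
  induction bs with
  | nil => intro rows _; simp [innerForA]
  | cons b bs ih =>
    intro rows h
    have ht : (n - (rows.length : Int)).toNat = ((n - rows.length - 1).toNat) + 1 := by omega
    simp only [innerForA]
    by_cases hb : ((rows ++ [seqFamily family b]).length : Int) = n
    · rw [if_pos hb]
      have : (n - (rows.length : Int)).toNat = 1 := by
        simp at hb; omega
      rw [this]
      simp
    · rw [if_neg hb]
      have hlen : (((rows ++ [seqFamily family b]).length : Int)) < n := by
        simp at hb ⊢; omega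
      rw [ih _ hlen]
      have : (n - ((rows ++ [seqFamily family b]).length : Int)).toNat
           = (n - rows.length - 1).toNat := by simp; omega
      rw [this, ht]
      simp [List.append_assoc]

-- map over a prefix of the product list is a block of canonical rows
lemma take_map_block (f : Nat) (t : Nat) (ht : t ≤ 16) :
    (bitsProduct.take t).map (seqFamily (↑f)) =
      (List.range t).map (fun r => rowN (16 * f + r)) := by
  apply List.ext_getElem
  · simp [bitsProduct]; omega
  · intro r h1 h2
    have h1' : r < t ∧ r < bitsProduct.length := by simpa using h1
    have hr16 : r < 16 := by have := h1'.2; simp [bitsProduct] at this; omega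
    simp only [List.getElem_map, List.getElem_take, List.getElem_range]
    rw [rowN_block f r hr16]

lemma whileA_eq (n : Int) :
    ∀ (fuel f : Nat),
      16 * f ≤ n.toNat → n.toNat ≤ 16 * f + fuel →
      whileA n fuel (↑f) ((List.range (16 * f)).map rowN) = (List.range n.toNat).map rowN := by
  intro fuel
  induction fuel with
  | zero =>
    intro f h1 h2
    have hf : 16 * f = n.toNat := by omega
    simp only [whileA]
    rw [hf]
  | succ fuel ih =>
    intro f h1 h2
    simp only [whileA]
    by_cases hlt : ((((List.range (16 * f)).map rowN).length : Int)) < n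
    · rw [if_pos hlt]
      have hlen : ((List.range (16 * f)).map rowN).length = 16 * f := by simp
      have hlt' : 16 * f < n.toNat := by rw [hlen] at hlt; omega
      rw [innerForA_eq n (↑f) bitsProduct _ hlt]
      set t : Nat := (n - (((List.range (16 * f)).map rowN).length : Int)).toNat with htdef
      by_cases hbig : 16 * (f + 1) ≤ n.toNat
      · -- full family consumed
        have ht16 : 16 ≤ t := by simp [htdef, hlen]; omega
        have : bitsProduct.take t = bitsProduct := by
          apply List.take_of_length_le; simp [bitsProduct]; omega
        rw [this]
        have hblock : (List.range (16 * f)).map rowN ++ bitsProduct.map (seqFamily (↑f))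
            = (List.range (16 * (f + 1))).map rowN := by
          have : bitsProduct.map (seqFamily (↑f)) = (List.range 16).map (fun r => rowN (16 * f + r)) := by
            have := take_map_block f 16 (le_refl 16)
            simpa [bitsProduct] using this
          rw [this]
          have h16 : 16 * (f + 1) = 16 * f + 16 := by ring
          rw [h16, List.range_add, List.map_append, List.map_map]
          rfl
        rw [hblock]
        have := ih (f + 1) hbig (by omega)
        exact_mod_cast this
      · -- partial family: reaches exactly n rows, next guard fails
        have htv : t = n.toNat - 16 * f := by simp [htdef, hlen]; omega
        have ht16 : t ≤ 16 := by omega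
        have hfin : (List.range (16 * f)).map rowN ++ (bitsProduct.take t).map (seqFamily (↑f))
            = (List.range n.toNat).map rowN := by
          rw [take_map_block f t ht16]
          have hsplit : n.toNat = 16 * f + t := by omega
          rw [hsplit, List.range_add, List.map_append, List.map_map]
          rfl
        rw [hfin]
        -- the recursive while call exits immediately (or fuel = 0): length = n.toNat ≥ n… guard false
        cases fuel with
        | zero => rfl
        | succ fuel' =>
          simp only [whileA]
          rw [if_neg (by simp only [List.length_map, List.length_range]; omega)]
    · rw [if_neg hlt]
      have hlen : ((List.range (16 * f)).map rowN).length = 16 * f := by simp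
      have : 16 * f = n.toNat := by rw [hlen] at hlt; omega
      rw [this]

-- ===== VERDICT (by name: the statement is the Claim_ definition above) =====
theorem training_sequences_py_spec : Claim_equal_training_sequences_py := by
  intro n _
  unfold Spec_training_sequences_py training_sequences_py
  rw [alt_eq_map]
  have h0 : ((List.range (16 * 0)).map rowN) = ([] : List (List String)) := by simp
  have := whileA_eq n n.toNat 0 (by omega) (by omega)
  rw [h0] at this
  exact_mod_cast this
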